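-- pv_equiv track=rewrite | github.com/indrajeet-77/Five-Months | 26.SlidingWIndow&TwoPointers/Q9.NumberOFSubstringContainingAllChars/brute.py | NumberOFSubstringContainingAllChars
-- ===== SOURCE A (Python) =====
-- def NumberOFSubstringContainingAllChars(s: str) -> int:
--     count = 0
--     n = len(s)
--     for i in range(0, n):
--         myset = set()
--         for j in range(i, n):
--             myset.add(s[j])
--             if len(myset) == 3:
--                 count += 1
--     return count
-- ===== SOURCE B (Python) =====
-- def NumberOFSubstringContainingAllChars(s: str) -> int:
--     count = 0
--     recent = []  # (char, last index), ordered by most recent occurrence first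
--     for j, ch in enumerate(s):
--         recent = [(c, p) for (c, p) in recent if c != ch]
--         recent = [(ch, j)] + recent
--         if len(recent) >= 3:
--             p3 = recent[2][1]
--             p4 = recent[3][1] if len(recent) >= 4 else -1
--             count += p3 - p4
--     return count
-- ===== Notes on version B (the rewrite author's own statement) =====
-- stated objective: faster
-- what changed: Replaced the nested loop over all start positions (growing a fresh character set per start) by a single left-to-right pass maintaining the prefix's distinct characters ordered by most-recent occurrence with their last indices; per position the number of valid starts is the 3rd-most-recent last index minus the 4th (or -1), added in closed form.
import Mathlib
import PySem

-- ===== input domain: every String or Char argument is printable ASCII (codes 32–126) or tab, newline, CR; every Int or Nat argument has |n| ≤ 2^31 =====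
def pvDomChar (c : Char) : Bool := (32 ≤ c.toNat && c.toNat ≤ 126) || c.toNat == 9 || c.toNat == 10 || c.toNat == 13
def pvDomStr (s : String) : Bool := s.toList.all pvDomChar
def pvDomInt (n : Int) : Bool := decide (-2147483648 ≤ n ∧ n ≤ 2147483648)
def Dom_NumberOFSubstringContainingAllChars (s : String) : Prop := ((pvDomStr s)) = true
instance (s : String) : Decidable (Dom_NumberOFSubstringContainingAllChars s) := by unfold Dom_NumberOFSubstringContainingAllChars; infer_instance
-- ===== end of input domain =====

-- B replaces A's nested scan over all start positions (a fresh character set per start) by one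
-- left-to-right pass keeping the prefix's distinct characters ordered by most-recent occurrence
-- with their last indices, adding per position a closed-form count of valid starts (objective: faster).

-- ===== PORT A =====
def NumberOFSubstringContainingAllChars (s : String) : Int :=
  let t := s.toList
  let n := t.length
  (List.range n).foldl (fun count i =>
    ((List.range' i (n - i)).foldl
      (fun (st : PySem.Set Char × Int) j =>
        let myset := PySem.Set.add st.1 (t.getD j ' ')   -- s[j]: j < n, always in range
        (myset, if PySem.Set.len myset == 3 then st.2 + 1 else st.2))
      (PySem.Set.empty, count)).2) 0

-- ===== PORT B =====
def NumberOFSubstringContainingAllChars_alt (s : String) : Int :=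
  ((PySem.List.enumerate s.toList 0).foldl
    (fun (st : List (Char × Int) × Int) jc =>
      let recent := (jc.2, jc.1) :: st.1.filter (fun q => q.1 != jc.2)
      let count :=
        if 3 ≤ recent.length then
          st.2 + ((recent.getD 2 (' ', 0)).2 -            -- recent[2][1]: in range under the test
            (if 4 ≤ recent.length then (recent.getD 3 (' ', 0)).2 else -1))
        else st.2
      (recent, count))
    ([], 0)).2

-- ===== PRECONDITION & SPEC =====
def Spec_NumberOFSubstringContainingAllChars (s : String) (out : Int) : Prop := out = NumberOFSubstringContainingAllChars_alt s
instance (s : String) (out : Int) : Decidable (Spec_NumberOFSubstringContainingAllChars s out) := by unfold Spec_NumberOFSubstringContainingAllChars; infer_instance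

-- ===== CLAIM (what is proved, stated in full; the proofs are below) =====
def Claim_equal_NumberOFSubstringContainingAllChars : Prop := ∀ (s : String), Dom_NumberOFSubstringContainingAllChars s → Spec_NumberOFSubstringContainingAllChars s (NumberOFSubstringContainingAllChars s)

-- ===== LEMMAS AND PROOFS =====

-- indicator: the window t[i..j] has exactly 3 distinct characters
def pvInd3 (t : List Char) (i j : ℕ) : ℤ :=
  if (PySem.List.dedup ((t.take (j+1)).drop i)).length = 3 then 1 else 0

-- one step of B's recency list
def pvRstep (r : List (Char × Int)) (jc : ℤ × Char) : List (Char × Int) :=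
  (jc.2, jc.1) :: r.filter (fun q => q.1 != jc.2)

-- B's recency list after the whole prefix p
def pvRecOf (p : List Char) : List (Char × Int) :=
  (PySem.List.enumerate p 0).foldl pvRstep []

-- B's per-position closed-form increment
def pvAddOf (r : List (Char × Int)) : ℤ :=
  if 3 ≤ r.length then
    (r.getD 2 (' ', 0)).2 - (if 4 ≤ r.length then (r.getD 3 (' ', 0)).2 else -1)
  else 0

theorem pvRecOf_snoc (p : List Char) (c : Char) :
    pvRecOf (p ++ [c]) = pvRstep (pvRecOf p) ((p.length : ℤ), c) := by
  unfold pvRecOf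
  rw [PySem.List.enumerate_append, List.foldl_append]
  simp [PySem.List.enumerate_cons]

theorem pvRecOf_bounds (p : List Char) :
    ∀ q ∈ pvRecOf p, 0 ≤ q.2 ∧ q.2 < (p.length : ℤ) := by
  induction p using List.reverseRecOn with
  | nil => simp [pvRecOf]
  | append_singleton p c ih =>
    rw [pvRecOf_snoc]
    intro q hq
    simp only [pvRstep, List.mem_cons] at hq
    rcases hq with rfl | hq
    · simp
    · have hq' := ih q (List.mem_of_mem_filter hq)
      simp only [List.length_append, List.length_cons, List.length_nil]
      push_cast
      omega

theorem pvRecOf_desc (p : List Char) :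
    (pvRecOf p).Pairwise (fun a b => b.2 < a.2) := by
  induction p using List.reverseRecOn with
  | nil => simp [pvRecOf]
  | append_singleton p c ih =>
    rw [pvRecOf_snoc]
    refine List.Pairwise.cons ?_ (ih.filter _)
    intro q hq
    exact (pvRecOf_bounds p q (List.mem_of_mem_filter hq)).2

theorem pvRecOf_fst_nodup (p : List Char) :
    ((pvRecOf p).map Prod.fst).Nodup := by
  induction p using List.reverseRecOn with
  | nil => simp [pvRecOf]
  | append_singleton p c ih =>
    rw [pvRecOf_snoc]
    simp only [pvRstep, List.map_cons]
    refine List.Nodup.cons ?_ (((List.filter_sublist).map Prod.fst).nodup ih)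
    intro hc
    obtain ⟨q, hq, hq1⟩ := List.mem_map.1 hc
    have := (List.mem_filter.1 hq).2
    rw [hq1] at this
    simp at this

theorem pvRecOf_fst_mem (p : List Char) (c : Char) :
    c ∈ (pvRecOf p).map Prod.fst ↔ c ∈ p := by
  induction p using List.reverseRecOn with
  | nil => simp [pvRecOf]
  | append_singleton p c' ih =>
    rw [pvRecOf_snoc]
    simp only [pvRstep, List.map_cons, List.mem_cons, List.mem_append]
    constructor
    · rintro (rfl | h)
      · simp
      · obtain ⟨q, hq, rfl⟩ := List.mem_map.1 h
        exact Or.inl (ih.1 (List.mem_map.2 ⟨q, List.mem_of_mem_filter hq, rfl⟩))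
    · rintro (h | h)
      · by_cases hcc : c = c'
        · exact Or.inl hcc
        · obtain ⟨q, hq, rfl⟩ := List.mem_map.1 (ih.2 h)
          exact Or.inr (List.mem_map.2 ⟨q, List.mem_filter.2 ⟨hq, by simpa using hcc⟩, rfl⟩)
      · simp at h
        exact Or.inl h

theorem pvRecOf_last (p : List Char) :
    ∀ q ∈ pvRecOf p, ∀ i : ℕ, ((i : ℤ) ≤ q.2 ↔ q.1 ∈ p.drop i) := by
  induction p using List.reverseRecOn with
  | nil => simp [pvRecOf]
  | append_singleton p c ih =>
    rw [pvRecOf_snoc]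
    intro q hq i
    simp only [pvRstep, List.mem_cons] at hq
    rcases hq with rfl | hq
    · simp only []
      by_cases hi : i ≤ p.length
      · rw [List.drop_append_of_le_length hi]
        constructor
        · intro _; simp
        · intro _; exact_mod_cast hi
      · rw [List.drop_eq_nil_of_le (by simp; omega)]
        constructor
        · intro h; exfalso; have h2 : (i:ℤ) ≤ (p.length:ℤ) := h; omega
        · intro h; simp at h
    · have hq' := List.mem_of_mem_filter hq
      have hne : q.1 ≠ c := by
        have := (List.mem_filter.1 hq).2; simpa using this
      rw [ih q hq' i]
      by_cases hi : i ≤ p.length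
      · rw [List.drop_append_of_le_length hi]
        simp [hne]
      · rw [List.drop_eq_nil_of_le (as := p) (by omega), List.drop_eq_nil_of_le (by simp; omega)]

theorem pvCountP_recOf (p : List Char) (i : ℕ) :
    (pvRecOf p).countP (fun q => decide ((i : ℤ) ≤ q.2)) =
      (PySem.List.dedup (p.drop i)).length := by
  rw [List.countP_eq_length_filter]
  have hlm : ((pvRecOf p).filter (fun q => decide ((i : ℤ) ≤ q.2))).length
      = (((pvRecOf p).filter (fun q => decide ((i : ℤ) ≤ q.2))).map Prod.fst).length := by
    simp
  rw [hlm]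
  refine List.Perm.length_eq ?_
  rw [List.perm_ext_iff_of_nodup
    (((List.filter_sublist).map Prod.fst).nodup (pvRecOf_fst_nodup p))
    (PySem.List.nodup_dedup _)]
  intro a
  rw [PySem.List.mem_dedup]
  constructor
  · intro h
    obtain ⟨q, hq, rfl⟩ := List.mem_map.1 h
    obtain ⟨hq1, hq2⟩ := List.mem_filter.1 hq
    exact (pvRecOf_last p q hq1 i).1 (by simpa using hq2)
  · intro h
    have hp : a ∈ p := by
      have := List.mem_of_mem_drop h
      exact this
    obtain ⟨q, hq, rfl⟩ := List.mem_map.1 ((pvRecOf_fst_mem p a).2 hp)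
    refine List.mem_map.2 ⟨q, List.mem_filter.2 ⟨hq, ?_⟩, rfl⟩
    simpa using (pvRecOf_last p q hq i).2 h

theorem pvCntRange (N : ℕ) (lo hi : ℤ) (hlo : -1 ≤ lo) (hlh : lo ≤ hi) :
    ((List.range N).map (fun (i : ℕ) => if lo < (i:ℤ) ∧ (i:ℤ) ≤ hi then (1:ℤ) else 0)).sum
      = min (hi + 1) (N : ℤ) - min (lo + 1) (N : ℤ) := by
  induction N with
  | zero =>
    simp
    omega
  | succ n ih =>
    rw [List.range_succ, List.map_append, List.sum_append, ih]
    simp only [List.map_cons, List.map_nil, List.sum_cons, List.sum_nil]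
    push_cast
    split_ifs with h <;> omega

theorem pvSeg (r : List (Char × Int)) (N : ℕ)
    (hb : ∀ q ∈ r, 0 ≤ q.2 ∧ q.2 < (N : ℤ))
    (hd : r.Pairwise (fun a b => b.2 < a.2)) :
    ((List.range N).map
        (fun (i : ℕ) => if r.countP (fun q => decide ((i:ℤ) ≤ q.2)) = 3 then (1:ℤ) else 0)).sum
      = pvAddOf r := by
  by_cases hlen : 3 ≤ r.length
  · obtain ⟨a, b, c, rest, rfl⟩ : ∃ a b c rest, r = a :: b :: c :: rest := by
      rcases r with _ | ⟨a, _ | ⟨b, _ | ⟨c, rest⟩⟩⟩ <;> simp at hlen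
      exact ⟨a, b, c, rest, rfl⟩
    have hab : b.2 < a.2 := List.rel_of_pairwise_cons hd (by simp)
    have hbc : c.2 < b.2 := List.rel_of_pairwise_cons hd.of_cons (by simp)
    have hcr : ∀ q ∈ rest, q.2 < c.2 :=
      fun q hq => List.rel_of_pairwise_cons hd.of_cons.of_cons hq
    have hbc' : c.2 < a.2 := lt_trans hbc hab
    have hc0 : 0 ≤ c.2 := (hb c (by simp)).1
    have hcN : c.2 < (N:ℤ) := (hb c (by simp)).2
    rcases rest with _ | ⟨d, rest2⟩
    · -- exactly three distinct-recency entries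
      have hterm : ∀ i : ℕ, i ∈ List.range N →
          (if (a :: b :: c :: ([] : List (Char × Int))).countP (fun q => decide ((i:ℤ) ≤ q.2)) = 3 then (1:ℤ) else 0)
            = if (-1:ℤ) < (i:ℤ) ∧ (i:ℤ) ≤ c.2 then (1:ℤ) else 0 := by
        intro i _
        simp only [List.countP_cons, List.countP_nil, decide_eq_true_eq]
        split_ifs <;> omega
      rw [List.map_congr_left hterm, pvCntRange N (-1) c.2 (by omega) (by omega)]
      simp only [pvAddOf, List.length_cons, List.length_nil]
      norm_num
      omega
    · -- at least four entries
      have hd0 : 0 ≤ d.2 := (hb d (by simp)).1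
      have hdc : d.2 < c.2 := hcr d (by simp)
      have hr2 : ∀ q ∈ rest2, q.2 < d.2 :=
        fun q hq => List.rel_of_pairwise_cons hd.of_cons.of_cons.of_cons hq
      have hterm : ∀ i : ℕ, i ∈ List.range N →
          (if (a :: b :: c :: d :: rest2).countP (fun q => decide ((i:ℤ) ≤ q.2)) = 3 then (1:ℤ) else 0)
            = if d.2 < (i:ℤ) ∧ (i:ℤ) ≤ c.2 then (1:ℤ) else 0 := by
        intro i _
        simp only [List.countP_cons, decide_eq_true_eq]
        by_cases h1 : (i:ℤ) ≤ d.2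
        · have h2 : (i:ℤ) ≤ c.2 := by omega
          split_ifs <;> omega
        · have hk0 : rest2.countP (fun q => decide ((i:ℤ) ≤ q.2)) = 0 := by
            rw [List.countP_eq_zero]
            intro q hq
            simp only [decide_eq_true_eq]
            have := hr2 q hq
            omega
          rw [hk0]
          split_ifs <;> omega
      rw [List.map_congr_left hterm, pvCntRange N d.2 c.2 (by omega) (by omega)]
      have hdN : d.2 < (N:ℤ) := (hb d (by simp)).2
      simp only [pvAddOf, List.length_cons]
      norm_num
      omega
  · have hterm : ∀ i : ℕ, i ∈ List.range N →
        (if r.countP (fun q => decide ((i:ℤ) ≤ q.2)) = 3 then (1:ℤ) else 0) = (0:ℤ) := by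
      intro i _
      rw [if_neg]
      have := List.countP_le_length (p := fun q => decide ((i:ℤ) ≤ q.2)) (l := r)
      omega
    rw [List.map_congr_left hterm]
    simp [pvAddOf, hlen]

theorem pvStep (p : List Char) :
    pvAddOf (pvRecOf p) =
      ((List.range p.length).map
        (fun i => if (PySem.List.dedup (p.drop i)).length = 3 then (1:ℤ) else 0)).sum := by
  rw [← pvSeg (pvRecOf p) p.length (pvRecOf_bounds p) (pvRecOf_desc p)]
  refine congrArg List.sum (List.map_congr_left ?_)
  intro i _
  rw [pvCountP_recOf]

theorem pvB_outer (p : List Char) :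
    (PySem.List.enumerate p 0).foldl
      (fun (st : List (Char × Int) × Int) jc =>
        let recent := (jc.2, jc.1) :: st.1.filter (fun q => q.1 != jc.2)
        let count :=
          if 3 ≤ recent.length then
            st.2 + ((recent.getD 2 (' ', 0)).2 -
              (if 4 ≤ recent.length then (recent.getD 3 (' ', 0)).2 else -1))
          else st.2
        (recent, count))
      ([], 0)
    = (pvRecOf p, ((List.range p.length).map (fun j => pvAddOf (pvRecOf (p.take (j+1))))).sum) := by
  induction p using List.reverseRecOn with
  | nil => simp [pvRecOf]
  | append_singleton p c ih =>
    rw [PySem.List.enumerate_append, List.foldl_append, ih]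
    simp only [PySem.List.enumerate_cons, PySem.List.enumerate_nil, List.foldl_cons, List.foldl_nil]
    have hrec : (c, ((0:ℤ) + (p.length:ℤ))) :: (pvRecOf p).filter (fun q => q.1 != c)
        = pvRecOf (p ++ [c]) := by
      rw [pvRecOf_snoc]; simp [pvRstep]
    refine Prod.ext ?_ ?_
    · simpa using hrec
    · simp only []
      have hlen1 : (p ++ [c]).length = p.length + 1 := by simp
      rw [hlen1, List.range_succ, List.map_append, List.sum_append]
      have h1 : (List.range p.length).map (fun j => pvAddOf (pvRecOf ((p ++ [c]).take (j+1))))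
          = (List.range p.length).map (fun j => pvAddOf (pvRecOf (p.take (j+1)))) := by
        refine List.map_congr_left ?_
        intro j hj; rw [List.mem_range] at hj
        rw [List.take_append_of_le_length (by omega)]
      have h2 : (p ++ [c]).take (p.length + 1) = p ++ [c] := by
        apply List.take_of_length_le; simp
      simp only [List.map_cons, List.map_nil, List.sum_cons, List.sum_nil, h1, h2]
      rw [← hrec]
      unfold pvAddOf
      simp only [List.length_cons]
      split_ifs with h3 h4 <;> ring

theorem pvB_eq (s : String) :
    NumberOFSubstringContainingAllChars_alt s =
      ((List.range s.toList.length).map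
        (fun j => pvAddOf (pvRecOf (s.toList.take (j+1))))).sum := by
  unfold NumberOFSubstringContainingAllChars_alt
  rw [pvB_outer s.toList]

theorem pvA_inner (t : List Char) (i : ℕ) (m : ℕ) (hm : i + m ≤ t.length) (c0 : ℤ) :
    (List.range' i m).foldl
      (fun (st : PySem.Set Char × Int) j =>
        let myset := PySem.Set.add st.1 (t.getD j ' ')
        (myset, if PySem.Set.len myset == 3 then st.2 + 1 else st.2))
      (PySem.Set.empty, c0)
    = (PySem.Set.ofList ((t.drop i).take m),
       c0 + ((List.range m).map (fun k => pvInd3 t i (i+k))).sum) := by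
  induction m with
  | zero => simp
  | succ m ih =>
    rw [List.range'_concat, List.foldl_append, ih (by omega)]
    have him : i + m < t.length := by omega
    simp only [List.foldl_cons, List.foldl_nil]
    have hget : t.getD (i + 1 * m) ' ' = t[i+m] := by
      have h1 : i + 1 * m = i + m := by ring
      rw [h1, List.getD_eq_getElem t ' ' him]
    have htake : (t.drop i).take (m+1) = (t.drop i).take m ++ [t[i+m]] := by
      rw [List.take_add_one]
      congr 1
      have : (t.drop i)[m]? = some t[i+m] := by
        rw [List.getElem?_drop]
        exact List.getElem?_eq_getElem (by omega)
      rw [this]; rfl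
    have hset : PySem.Set.add (PySem.Set.ofList ((t.drop i).take m)) t[i+m]
        = PySem.Set.ofList ((t.drop i).take (m+1)) := by
      rw [htake, PySem.Set.ofList_append_singleton]
    have hlen3 : (PySem.Set.len (PySem.Set.ofList ((t.drop i).take (m+1))) == 3)
        = decide ((PySem.List.dedup ((t.take (i+m+1)).drop i)).length = 3) := by
      have hdt : (t.take (i+m+1)).drop i = (t.drop i).take (m+1) := by
        rw [List.drop_take]; congr 1; omega
      rw [hdt]
      simp only [PySem.Set.len, PySem.List.dedup_eq_ofList]
      rw [Bool.eq_iff_iff]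
      simp only [beq_iff_eq, decide_eq_true_eq]
      omega
    rw [List.range_succ, List.map_append, List.sum_append]
    simp only [hget, hset, hlen3]
    simp only [List.map_cons, List.map_nil, List.sum_cons, List.sum_nil]
    unfold pvInd3
    refine Prod.ext rfl ?_
    simp only [decide_eq_true_eq]
    split_ifs with h <;> ring

theorem pvA_outer (t : List Char) (l : List ℕ) (hl : ∀ i ∈ l, i ≤ t.length) (a : ℤ) :
    l.foldl (fun count i =>
      ((List.range' i (t.length - i)).foldl
        (fun (st : PySem.Set Char × Int) j =>
          let myset := PySem.Set.add st.1 (t.getD j ' ')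
          (myset, if PySem.Set.len myset == 3 then st.2 + 1 else st.2))
        (PySem.Set.empty, count)).2) a
    = a + (l.map (fun i => ((List.range (t.length - i)).map (fun k => pvInd3 t i (i+k))).sum)).sum := by
  induction l generalizing a with
  | nil => simp
  | cons x xs ih =>
    simp only [List.foldl_cons, List.map_cons, List.sum_cons]
    rw [pvA_inner t x (t.length - x) (by have := hl x (by simp); omega) a]
    rw [ih (by intro i hi; exact hl i (by simp [hi]))]
    ring

theorem pvA_eq (s : String) :
    NumberOFSubstringContainingAllChars s =
      ((List.range s.toList.length).map
        (fun i => ((List.range (s.toList.length - i)).map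
            (fun k => pvInd3 s.toList i (i+k))).sum)).sum := by
  have h := pvA_outer s.toList (List.range s.toList.length)
    (by intro i hi; rw [List.mem_range] at hi; omega) 0
  rw [zero_add] at h
  exact h

theorem pvTriangle (g : ℕ → ℕ → ℤ) (n : ℕ) :
    ((List.range n).map (fun i => ((List.range (n - i)).map (fun k => g i (i+k))).sum)).sum
      = ((List.range n).map (fun j => ((List.range (j+1)).map (fun i => g i j)).sum)).sum := by
  have hsplit : ∀ (f : ℕ → ℤ) (m : ℕ), ((List.range (m+1)).map f).sum = ((List.range m).map f).sum + f m := by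
    intro f m; rw [List.range_succ]; simp
  induction n with
  | zero => simp
  | succ n ih =>
    rw [hsplit, hsplit]
    have hterm : ((List.range n).map (fun i => ((List.range (n+1-i)).map (fun k => g i (i+k))).sum)).sum
        = ((List.range n).map (fun i => ((List.range (n-i)).map (fun k => g i (i+k))).sum)).sum
          + ((List.range n).map (fun i => g i n)).sum := by
      rw [← PySem.List.sum_map_add_int]
      refine congrArg List.sum (List.map_congr_left ?_)
      intro i hi; rw [List.mem_range] at hi
      have h1 : n + 1 - i = (n - i) + 1 := by omega
      rw [h1, hsplit]
      have h2 : i + (n - i) = n := by omega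
      rw [h2]
    have hlast : ((List.range (n+1-n)).map (fun k => g n (n+k))).sum = g n n := by
      have h3 : n+1-n = 1 := by omega
      simp [h3]
    rw [hterm, hlast, ih, hsplit (fun i => g i n)]
    ring

-- ===== VERDICT (by name: the statement is the Claim_ definition above) =====
theorem NumberOFSubstringContainingAllChars_spec : Claim_equal_NumberOFSubstringContainingAllChars := by
  intro s _
  unfold Spec_NumberOFSubstringContainingAllChars
  rw [pvA_eq, pvB_eq, pvTriangle (fun i j => pvInd3 s.toList i j)]
  refine congrArg List.sum (List.map_congr_left ?_)
  intro j hj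
  rw [List.mem_range] at hj
  rw [pvStep]
  have hlen : (s.toList.take (j+1)).length = j + 1 := by
    rw [List.length_take]; omega
  rw [hlen]
  refine congrArg List.sum (List.map_congr_left ?_)
  intro i _
  simp only [pvInd3]
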